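-- pv_equiv track=rewrite | github.com/Kim-kwan-woo/Woogorithm-2022 | baekjoon/구현/8958.py | solution
-- ===== SOURCE A (Python) =====
-- def solution(oxList):
--     score = []
--     for i in oxList:
--         tempScore = 0
--         sumScore = 1
--         for j in range(len(i)):
--             if i[j] == 'O':
--                 tempScore += sumScore
--                 sumScore += 1
--             else:
--                 sumScore = 1
--         score.append(tempScore)
--
--     return score
-- ===== SOURCE B (Python) =====
-- def solution(oxList):
--     out = []
--     for s in oxList:
--         total = 0
--         i = 0
--         n = len(s)
--         while i < n:
--             if s[i] == 'O':
--                 j = i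
--                 while j < n and s[j] == 'O':
--                     j += 1
--                 L = j - i
--                 total += L * (L + 1) // 2
--                 i = j
--             else:
--                 i += 1
--         out.append(total)
--     return out
-- ===== Notes on version B (the rewrite author's own statement) =====
-- stated objective: alternative
-- what changed: Replaces A's per-character incremental streak accumulator with two-pointer detection of maximal O-runs and a closed-form triangular sum L*(L+1)//2 per run.
import Mathlib
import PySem

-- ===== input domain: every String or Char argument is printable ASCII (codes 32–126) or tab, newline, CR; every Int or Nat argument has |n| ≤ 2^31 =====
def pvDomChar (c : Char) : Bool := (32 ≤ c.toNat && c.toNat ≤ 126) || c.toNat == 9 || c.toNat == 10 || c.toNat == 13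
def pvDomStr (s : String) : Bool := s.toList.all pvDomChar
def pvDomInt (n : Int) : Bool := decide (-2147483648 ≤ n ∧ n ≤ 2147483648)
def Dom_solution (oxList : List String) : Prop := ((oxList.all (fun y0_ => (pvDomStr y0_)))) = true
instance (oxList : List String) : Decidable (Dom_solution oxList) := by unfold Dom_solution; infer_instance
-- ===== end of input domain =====

-- B replaces A's incremental streak accumulation with maximal-O-run detection plus a
-- closed-form triangular sum per run (objective: alternative algorithm, same cost).

-- ===== PORT A =====
-- A's inner loop over j in range(len(i)) reading i[j]: ported as a left fold over the
-- characters in order, carrying the state (tempScore, sumScore).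
def solStepA (st : Int × Int) (c : Char) : Int × Int :=
  if c == 'O' then (st.1 + st.2, st.2 + 1) else (st.1, 1)

def solution (oxList : List String) : List Int :=
  oxList.map (fun i => (i.toList.foldl solStepA (0, 1)).1)

-- ===== PORT B =====
-- per-string score: skip non-O chars; on an 'O', take the whole maximal run (the inner
-- while loop of Source B) and add L*(L+1)//2.
def scoreB : List Char → Int
  | [] => 0
  | c :: cs =>
    if c == 'O' then
      Int.ofNat ((List.takeWhile (fun x => x == 'O') (c :: cs)).length *
          ((List.takeWhile (fun x => x == 'O') (c :: cs)).length + 1) / 2)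
        + scoreB (List.dropWhile (fun x => x == 'O') (c :: cs))
    else scoreB cs
termination_by l => l.length
decreasing_by
  · simp only [List.dropWhile]
    split
    · exact Nat.lt_succ_of_le (List.length_dropWhile_le _ _)
    · simp_all
  · simp

def solution_alt (oxList : List String) : List Int :=
  oxList.map (fun s => scoreB s.toList)

-- ===== PRECONDITION & SPEC =====
def Spec_solution (oxList : List String) (out : List Int) : Prop := out = solution_alt oxList
instance (oxList : List String) (out : List Int) : Decidable (Spec_solution oxList out) := by unfold Spec_solution; infer_instance

-- ===== CLAIM (what is proved, stated in full; the proofs are below) =====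
def Claim_equal_solution : Prop := ∀ (oxList : List String), Dom_solution oxList → Spec_solution oxList (solution oxList)

-- ===== LEMMAS AND PROOFS =====

-- offset sum 0+1+…+(L-1)
def offI : Nat → Int
  | 0 => 0
  | L + 1 => offI L + L

lemma tri_eq (L : Nat) : (Int.ofNat (L * (L + 1) / 2)) = (L : Int) + offI L := by
  induction L with
  | zero => simp [offI]
  | succ L ih =>
      have h : (L + 1) * (L + 1 + 1) = L * (L + 1) + (L + 1) * 2 := by ring
      have h2 : (L + 1) * (L + 1 + 1) / 2 = L * (L + 1) / 2 + (L + 1) := by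
        rw [h, Nat.add_mul_div_right _ _ (by omega)]
      simp only [Int.ofNat_eq_natCast] at ih ⊢
      rw [h2, Nat.cast_add, ih]
      simp only [offI]
      push_cast
      ring

lemma runFold (L : Nat) : ∀ (t s : Int) (cs : List Char),
    List.foldl solStepA (t, s) (List.replicate L 'O' ++ cs)
      = List.foldl solStepA (t + s * L + offI L, s + L) cs := by
  induction L with
  | zero => intro t s cs; simp [offI]
  | succ L ih =>
      intro t s cs
      simp only [List.replicate_succ, List.cons_append, List.foldl_cons]
      have hstep : solStepA (t, s) 'O' = (t + s, s + 1) := by simp [solStepA]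
      rw [hstep, ih]
      have h1 : t + s + (s + 1) * (L : Int) + offI L = t + s * ((L : Nat) + 1 : Nat) + offI (L + 1) := by
        simp only [offI]; push_cast; ring
      have h2 : s + 1 + (L : Int) = s + ((L : Nat) + 1 : Nat) := by push_cast; ring
      rw [h1, h2]

lemma takeWhile_O_replicate (l : List Char) :
    List.takeWhile (fun x => x == 'O') l
      = List.replicate (List.takeWhile (fun x => x == 'O') l).length 'O' := by
  rw [List.eq_replicate_iff]
  refine ⟨rfl, ?_⟩
  intro b hb
  have := List.mem_takeWhile_imp hb
  simpa using this

lemma scoreA_eq_scoreB (l : List Char) : ∀ t : Int,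
    (List.foldl solStepA (t, 1) l).1 = t + scoreB l := by
  induction l using scoreB.induct with
  | case1 => intro t; simp [scoreB]
  | case2 c cs hO ih =>
      intro t
      have hrep := takeWhile_O_replicate (c :: cs)
      have hsplit := List.takeWhile_append_dropWhile (p := fun x => x == 'O') (l := c :: cs)
      have hfold : List.foldl solStepA (t, 1) (c :: cs)
          = List.foldl solStepA
              (t + 1 * (List.takeWhile (fun x => x == 'O') (c :: cs)).length
                 + offI (List.takeWhile (fun x => x == 'O') (c :: cs)).length,
               1 + (List.takeWhile (fun x => x == 'O') (c :: cs)).length)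
              (List.dropWhile (fun x => x == 'O') (c :: cs)) := by
        conv_lhs => rw [← hsplit, hrep]
        exact runFold _ t 1 _
      have hrest : ∀ (t' s' : Int),
          (List.foldl solStepA (t', s') (List.dropWhile (fun x => x == 'O') (c :: cs))).1
            = t' + scoreB (List.dropWhile (fun x => x == 'O') (c :: cs)) := by
        rcases hr : List.dropWhile (fun x => x == 'O') (c :: cs) with _ | ⟨d, ds⟩
        · intro t' s'; simp [scoreB]
        · have hd : (d == 'O') = false := by
            have := List.head?_dropWhile_not (p := fun x => x == 'O') (l := c :: cs)
            rw [hr] at this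
            simpa using this
          intro t' s'
          have hswap : List.foldl solStepA (t', s') (d :: ds)
              = List.foldl solStepA (t', 1) (d :: ds) := by
            simp only [List.foldl_cons]
            congr 1
            simp [solStepA, hd]
          rw [hswap, ← hr]
          exact ih t'
      rw [hfold, hrest]
      rw [scoreB]
      simp only [hO, if_true]
      rw [tri_eq]
      ring
  | case3 c cs hO ih =>
      intro t
      have hstep : solStepA (t, 1) c = (t, 1) := by simp [solStepA, hO]
      rw [scoreB]
      simp only [hO, List.foldl_cons, hstep]
      exact ih t

-- ===== VERDICT (by name: the statement is the Claim_ definition above) =====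
theorem solution_spec : Claim_equal_solution := by
  unfold Claim_equal_solution Spec_solution solution solution_alt
  intro oxList _
  simp only [List.map_inj_left]
  intro s _
  simpa using scoreA_eq_scoreB s.toList 0
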